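-- pv_equiv track=rewrite | github.com/rismakov/AIsthetic | setup_tags.py | get_next_cat_and_item_inds
-- ===== SOURCE A (Python) =====
-- from typing import Dict, List, Tuple
--
-- def is_end_of_category(cat_items: list, item_i: int) -> bool:
--     """Check if `item_i` is greater or equal than length of items.
--
--     Parameters
--     ----------
--     cat_items : list
--     item_i : int
--
--     Returns
--     -------
--     bool
--     """
--     return item_i >= len(cat_items)
--
-- def get_next_cat_and_item_inds(
--     items, cats: List[str], cat_i: int, item_i: int
-- ) -> Tuple[int, int]:
--     """Update `cat_i` and `item_i`.
--
--     Increment `item_i` by one. Unless end of category list, then reinitialize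
--     `item_i` to 0 and increment `cat_i` by one.
--
--     If end of list and no more non-empty categories, return None. Update state
--     to 'is_item_tag_session' = False.
--
--     Parameters
--     ----------
--     cats : List[str]
--         List of all categories.
--     cat_i : int
--         The category index.
--     item_i : int
--         The item index.
--
--     Returns
--     -------
--     Tuple[int, int]
--         The updated `cat_i` and `item_i`.
--     """
--     if cat_i == len(cats):
--         return None, None
--
--     # if end of category list, increment `cat_i` and re-initialize `item_i`
--     # if -1 passed in for `item_i` (indicating new category), pass in 0 instead
--     if is_end_of_category(items[cats[cat_i]], item_i + 1):
--         return get_next_cat_and_item_inds(items, cats, cat_i + 1, -1)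
--
--     return cat_i, item_i + 1
-- ===== SOURCE B (Python) =====
-- def get_next_cat_and_item_inds(items, cats, cat_i, item_i):
--     if cat_i == len(cats):
--         return None, None
--     if item_i + 1 < len(items[cats[cat_i]]):
--         return cat_i, item_i + 1
--     # current category exhausted: find the first non-empty category after it
--     for j in range(cat_i + 1, len(cats)):
--         if len(items[cats[j]]) > 0:
--             return j, 0
--     return None, None
-- ===== Notes on version B (the rewrite author's own statement) =====
-- stated objective: simpler
-- what changed: Replaced the tail recursion with helper and -1 reset sentinel by two early returns plus a find-first-non-empty for-loop over the remaining categories.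
import Mathlib
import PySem

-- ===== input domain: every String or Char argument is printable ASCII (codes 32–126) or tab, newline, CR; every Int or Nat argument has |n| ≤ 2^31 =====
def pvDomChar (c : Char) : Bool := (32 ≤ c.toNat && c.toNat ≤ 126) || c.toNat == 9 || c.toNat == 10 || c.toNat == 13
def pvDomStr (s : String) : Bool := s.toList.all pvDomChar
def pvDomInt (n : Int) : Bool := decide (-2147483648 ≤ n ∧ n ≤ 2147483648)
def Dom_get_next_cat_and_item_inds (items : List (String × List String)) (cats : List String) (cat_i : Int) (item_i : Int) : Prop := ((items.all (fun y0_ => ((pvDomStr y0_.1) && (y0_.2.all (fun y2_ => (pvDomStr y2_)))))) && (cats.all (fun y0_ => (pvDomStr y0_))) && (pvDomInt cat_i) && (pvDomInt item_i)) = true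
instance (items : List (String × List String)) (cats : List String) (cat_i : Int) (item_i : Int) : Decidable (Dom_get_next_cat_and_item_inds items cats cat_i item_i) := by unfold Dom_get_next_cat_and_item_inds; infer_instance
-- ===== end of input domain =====

-- B replaces A's tail recursion (helper + item_i = -1 reset sentinel) by two early returns plus a
-- find-first-non-empty for-loop over the remaining categories; objective: simpler. Equal return value on Pre_.

-- ===== PORT A =====
def is_end_of_category (cat_items : List String) (item_i : Int) : Bool :=
  decide ((cat_items.length : Int) ≤ item_i)

def get_next_cat_and_item_inds (items : List (String × List String)) (cats : List String) (cat_i : Int) (item_i : Int) : Option Int × Option Int :=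
  if cat_i = (cats.length : Int) then (none, none)
  else
    match h : PySem.List.pyGet? cats cat_i with
    | none => (none, none)          -- IndexError on cats[cat_i]; excluded by Pre_
    | some cat =>
      match (PySem.Dict.mk items).get? cat with
      | none => (none, none)        -- KeyError on items[...]; excluded by Pre_
      | some cat_items =>
        if is_end_of_category cat_items (item_i + 1) then
          get_next_cat_and_item_inds items cats (cat_i + 1) (-1)
        else (some cat_i, some (item_i + 1))
termination_by (cats.length - cat_i).toNat
decreasing_by
  have hin : PySem.Raise.InRange cats.length cat_i := by
    by_contra hc
    rw [← PySem.List.pyGet?_eq_none_iff] at hc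
    simp [hc] at h
  have : cat_i < (cats.length : Int) := hin.2
  omega

-- ===== PORT B =====
-- items[cats[j]] as one lookup (none = IndexError/KeyError, excluded by Pre_)
def pvCatItems? (items : List (String × List String)) (cats : List String) (j : Int) : Option (List String) :=
  (PySem.List.pyGet? cats j).bind (fun c => (PySem.Dict.mk items).get? c)

-- the 'for j in range(cat_i + 1, len(cats))' search of Source B, structural recursion on the index list
def gnci_find : (items : List (String × List String)) → (cats : List String) → List Int → Option Int × Option Int
  | _, _, [] => (none, none)
  | items, cats, j :: rest =>
    match pvCatItems? items cats j with
    | none => (none, none)          -- error while scanning; excluded by Pre_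
    | some v => if 0 < v.length then (some j, some 0) else gnci_find items cats rest

def get_next_cat_and_item_inds_alt (items : List (String × List String)) (cats : List String) (cat_i : Int) (item_i : Int) : Option Int × Option Int :=
  if cat_i = (cats.length : Int) then (none, none)
  else
    match pvCatItems? items cats cat_i with
    | none => (none, none)          -- error on the current category; excluded by Pre_
    | some v =>
      if item_i + 1 < (v.length : Int) then (some cat_i, some (item_i + 1))
      else gnci_find items cats (PySem.List.pyRange (cat_i + 1) cats.length 1)

-- ===== PRECONDITION & SPEC =====
-- helpers for Pre_: does category index j have a present key, and how many items does it hold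
def pvPresent (items : List (String × List String)) (cats : List String) (j : Int) : Bool :=
  (pvCatItems? items cats j).isSome
def pvLenAt (items : List (String × List String)) (cats : List String) (j : Int) : Int :=
  ((pvCatItems? items cats j).getD []).length

-- Pre_ holds exactly when Python A returns normally: either cat_i == len(cats); or cats[cat_i] is a
-- valid index with a present key and either the current category still has an item at item_i + 1,
-- or every later index the scan would visit (i.e. not shielded by an earlier present non-empty
-- category) also has a present key — outside Pre_ A raises IndexError or KeyError.
def Pre_get_next_cat_and_item_inds (items : List (String × List String)) (cats : List String) (cat_i : Int) (item_i : Int) : Prop :=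
  cat_i = (cats.length : Int) ∨
  (pvPresent items cats cat_i = true ∧
    (item_i + 1 < pvLenAt items cats cat_i ∨
      ∀ j ∈ PySem.List.pyRange (cat_i + 1) cats.length 1,
        (∃ k ∈ PySem.List.pyRange (cat_i + 1) j 1,
            pvPresent items cats k = true ∧ 0 < pvLenAt items cats k) ∨
        pvPresent items cats j = true))
instance (items : List (String × List String)) (cats : List String) (cat_i : Int) (item_i : Int) : Decidable (Pre_get_next_cat_and_item_inds items cats cat_i item_i) := by unfold Pre_get_next_cat_and_item_inds; infer_instance

def pvWitness_get_next_cat_and_item_inds : (List (String × List String)) × List String × Int × Int :=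
  ([("a", ["x", "y"])], ["a"], 0, -1)

def Spec_get_next_cat_and_item_inds (items : List (String × List String)) (cats : List String) (cat_i : Int) (item_i : Int) (out : Option Int × Option Int) : Prop := out = get_next_cat_and_item_inds_alt items cats cat_i item_i
instance (items : List (String × List String)) (cats : List String) (cat_i : Int) (item_i : Int) (out : Option Int × Option Int) : Decidable (Spec_get_next_cat_and_item_inds items cats cat_i item_i out) := by unfold Spec_get_next_cat_and_item_inds; infer_instance

-- ===== CLAIM (what is proved, stated in full; the proofs are below) =====
def Claim_equal_get_next_cat_and_item_inds : Prop := ∀ (items : List (String × List String)) (cats : List String) (cat_i : Int) (item_i : Int), Dom_get_next_cat_and_item_inds items cats cat_i item_i → Pre_get_next_cat_and_item_inds items cats cat_i item_i → Spec_get_next_cat_and_item_inds items cats cat_i item_i (get_next_cat_and_item_inds items cats cat_i item_i)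

-- ===== LEMMAS AND PROOFS =====
-- A's recursion restarted at c with item_i = -1 equals B's scan over range(c, len(cats));
-- holds for all inputs (both ports pick the same default at the excluded error points).
theorem gnci_restart_eq_find (items : List (String × List String)) (cats : List String) (c : Int) (hc : c ≤ (cats.length : Int)) :
    get_next_cat_and_item_inds items cats c (-1) =
      gnci_find items cats (PySem.List.pyRange c cats.length 1) := by
  by_cases hend : c = (cats.length : Int)
  · subst hend
    rw [get_next_cat_and_item_inds, PySem.List.pyRange_one_eq_nil (le_refl _)]
    simp [gnci_find]
  · have hlt : c < (cats.length : Int) := lt_of_le_of_ne hc hend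
    rw [get_next_cat_and_item_inds, if_neg hend, PySem.List.pyRange_one_cons hlt]
    cases hg : PySem.List.pyGet? cats c with
    | none => simp [gnci_find, pvCatItems?, hg]
    | some cat =>
      cases hd : (PySem.Dict.mk items).get? cat with
      | none => simp [gnci_find, pvCatItems?, hg, hd]
      | some v =>
        have hrec := gnci_restart_eq_find items cats (c + 1) (by omega)
        simp only [gnci_find, pvCatItems?, hg, hd, Option.bind]
        simp only [is_end_of_category]
        by_cases hempty : v.length = 0
        · rw [if_pos (show decide ((v.length : Int) ≤ -1 + 1) = true by rw [decide_eq_true_iff]; omega),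
              if_neg (show ¬ 0 < v.length by omega), hrec]
        · rw [if_neg (show ¬ decide ((v.length : Int) ≤ -1 + 1) = true by simp only [decide_eq_true_iff]; omega),
              if_pos (show 0 < v.length by omega)]
          rfl
termination_by (cats.length - c).toNat
decreasing_by omega

theorem gnci_eq_alt (items : List (String × List String)) (cats : List String) (cat_i : Int) (item_i : Int) :
    get_next_cat_and_item_inds items cats cat_i item_i =
      get_next_cat_and_item_inds_alt items cats cat_i item_i := by
  rw [get_next_cat_and_item_inds, get_next_cat_and_item_inds_alt]
  by_cases hend : cat_i = (cats.length : Int)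
  · simp [hend]
  · rw [if_neg hend, if_neg hend]
    cases hg : PySem.List.pyGet? cats cat_i with
    | none => simp [pvCatItems?, hg]
    | some cat =>
      cases hd : (PySem.Dict.mk items).get? cat with
      | none => simp [pvCatItems?, hg, hd]
      | some v =>
        have hin : PySem.Raise.InRange cats.length cat_i := by
          by_contra hc
          rw [← PySem.List.pyGet?_eq_none_iff] at hc
          simp [hc] at hg
        have hlt : cat_i < (cats.length : Int) := hin.2
        simp only [pvCatItems?, hg, hd, Option.bind]
        simp only [is_end_of_category]
        by_cases hdone : item_i + 1 < (v.length : Int)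
        · rw [if_neg (show ¬ decide ((v.length : Int) ≤ item_i + 1) = true by simp only [decide_eq_true_iff]; omega), if_pos hdone]
        · rw [if_pos (show decide ((v.length : Int) ≤ item_i + 1) = true by rw [decide_eq_true_iff]; omega), if_neg hdone]
          exact gnci_restart_eq_find items cats (cat_i + 1) (by omega)

-- ===== VERDICT (by name: the statement is the Claim_ definition above) =====
theorem get_next_cat_and_item_inds_spec : Claim_equal_get_next_cat_and_item_inds := by
  intro items cats cat_i item_i _ _
  exact gnci_eq_alt items cats cat_i item_i
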